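-- pv_equiv track=rewrite | github.com/reykjavik-university/2020-3-T-111-PROG | assignments/functions/advanced/tetris.py | determine_clearance
-- ===== SOURCE A (Python) =====
-- def determine_clearance(text, max_width):
--     min_clearance_left = max_width
--     min_clearance_right = max_width
--     for line in text.splitlines():
--         clearance_left = len(line) - len(line.lstrip(" "))
--         min_clearance_left = min(clearance_left, min_clearance_left)
--         clearance_right = max_width - len(line)
--         min_clearance_right = min(clearance_right, min_clearance_right)
--     return min_clearance_left, min_clearance_right
-- ===== SOURCE B (Python) =====
-- def determine_clearance(text, max_width):
--     # One character-level scan: no splitlines(), no per-line strings are built.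
--     min_left = max_width
--     max_len = 0
--     indent = 0
--     length = 0
--     leading = True
--     i = 0
--     n = len(text)
--     while i < n:
--         ch = text[i]
--         if ch == '\r' or ch == '\n':
--             min_left = min(min_left, indent)
--             max_len = max(max_len, length)
--             indent = 0
--             length = 0
--             leading = True
--             if ch == '\r' and i + 1 < n and text[i + 1] == '\n':
--                 i += 2
--             else:
--                 i += 1
--         else:
--             length += 1
--             if leading:
--                 if ch == ' ':
--                     indent += 1
--                 else:
--                     leading = False
--             i += 1
--     if length > 0:
--         min_left = min(min_left, indent)
--         max_len = max(max_len, length)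
--     return min_left, max_width - max_len
-- ===== Notes on version B (the rewrite author's own statement) =====
-- stated objective: alternative
-- what changed: Replaces A's splitlines()-then-loop with a single character-level state machine over the raw string: it never materialises a list of lines, tracking per-line indent/length and a running min-indent and max line length, and returns max_width - max_len using min(max_width - len) = max_width - max(len).
import Mathlib
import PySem

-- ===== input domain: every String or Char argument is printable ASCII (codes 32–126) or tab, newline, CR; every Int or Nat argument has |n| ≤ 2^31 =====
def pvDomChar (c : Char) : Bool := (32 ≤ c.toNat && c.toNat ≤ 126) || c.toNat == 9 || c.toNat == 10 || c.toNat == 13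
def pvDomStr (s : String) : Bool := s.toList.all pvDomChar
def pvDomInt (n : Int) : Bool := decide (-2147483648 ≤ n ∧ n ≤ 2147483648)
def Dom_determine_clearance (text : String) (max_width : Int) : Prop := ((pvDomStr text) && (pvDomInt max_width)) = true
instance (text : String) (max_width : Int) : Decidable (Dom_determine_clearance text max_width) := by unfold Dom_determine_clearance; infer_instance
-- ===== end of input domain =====

-- B scans the raw string character by character (a splitlines-free state machine tracking per-line indent/length and a running min-indent / max line length) instead of A's loop over text.splitlines(); alternative decomposition, same cost.


-- line.lstrip(" ") strips only spaces: hand-ported (exact) as dropWhile (· == ' ') on the char list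
def pvLstripSpaces (s : String) : String := String.ofList (s.toList.dropWhile (fun c => c == ' '))

-- ===== PORT A =====
def determine_clearance (text : String) (max_width : Int) : Int × Int :=
  (PySem.Str.splitlines text).foldl
    (fun (st : Int × Int) line =>
      let clearance_left := PySem.Str.len line - PySem.Str.len (pvLstripSpaces line)
      let min_clearance_left := min clearance_left st.1
      let clearance_right := max_width - PySem.Str.len line
      let min_clearance_right := min clearance_right st.2
      (min_clearance_left, min_clearance_right))
    (max_width, max_width)

-- ===== PORT B =====
-- Source B's while-loop over the character index, as structural recursion on the remaining
-- characters; Source B's lookahead `ch=='\r' and i+1<n and text[i+1]=='\n'` is the '\r'::'\n' pattern.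
def dcScan : List Char → Int → Int → Int → Int → Bool → Int × Int
  | [], minLeft, maxLen, indent, length, _ =>
      if length > 0 then (min minLeft indent, max maxLen length) else (minLeft, maxLen)
  | '\r' :: '\n' :: rest, minLeft, maxLen, indent, length, _ =>
      dcScan rest (min minLeft indent) (max maxLen length) 0 0 true
  | c :: rest, minLeft, maxLen, indent, length, leading =>
      if c == '\r' || c == '\n' then
        dcScan rest (min minLeft indent) (max maxLen length) 0 0 true
      else if leading && c == ' ' then
        dcScan rest minLeft maxLen (indent + 1) (length + 1) true
      else
        dcScan rest minLeft maxLen indent (length + 1) false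

def determine_clearance_alt (text : String) (max_width : Int) : Int × Int :=
  let p := dcScan text.toList max_width 0 0 0 true
  (p.1, max_width - p.2)

-- ===== PRECONDITION & SPEC =====
def Spec_determine_clearance (text : String) (max_width : Int) (out : Int × Int) : Prop := out = determine_clearance_alt text max_width
instance (text : String) (max_width : Int) (out : Int × Int) : Decidable (Spec_determine_clearance text max_width out) := by unfold Spec_determine_clearance; infer_instance

-- ===== CLAIM (what is proved, stated in full; the proofs are below) =====
def Claim_equal_determine_clearance : Prop := ∀ (text : String) (max_width : Int), Dom_determine_clearance text max_width → Spec_determine_clearance text max_width (determine_clearance text max_width)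

-- ===== LEMMAS AND PROOFS =====

-- the line-break test splitlines uses, written out literally
def pvIsB (c : Char) : Bool :=
  decide (c.toNat = 10) || decide (c.toNat = 13) || decide (c.toNat = 11) || decide (c.toNat = 12) ||
  decide (c.toNat = 28) || decide (c.toNat = 29) || decide (c.toNat = 30) || decide (c.toNat = 133) ||
  decide (c.toNat = 8232) || decide (c.toNat = 8233)

theorem splitlines_eq_go (s : String) :
    PySem.Str.splitlines s = (PySem.Chars.splitlines.go pvIsB s.toList [] []).map String.ofList := rfl

theorem char_beq_toNat (c d : Char) : (c == d) = decide (c.toNat = d.toNat) := by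
  by_cases h : c = d
  · subst h; simp
  · have hn : c.toNat ≠ d.toNat := fun he => h (Char.ext (UInt32.toNat_inj.mp he))
    simp [h, hn]

-- inside the printable/tab/newline/CR domain, the break test is exactly '\r' or '\n'
theorem isB_of_dom (c : Char) (h : pvDomChar c = true) :
    pvIsB c = (c == '\r' || c == '\n') := by
  simp only [pvDomChar, Bool.or_eq_true, Bool.and_eq_true, decide_eq_true_eq, beq_iff_eq] at h
  apply Bool.eq_iff_iff.mpr
  simp only [pvIsB, Bool.or_eq_true, decide_eq_true_eq, char_beq_toNat,
    show ('\n').toNat = 10 from rfl, show ('\r').toNat = 13 from rfl]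
  omega

def pvInd (s : List Char) : Int := ((s.takeWhile (fun c => c == ' ')).length : Int)
def pvAllSp (s : List Char) : Bool := s.all (fun c => c == ' ')

theorem takeWhile_eq_self_of_allsp (s : List Char) (h : pvAllSp s = true) :
    s.takeWhile (fun c => c == ' ') = s := by
  simp only [pvAllSp, List.all_eq_true] at h
  exact List.takeWhile_eq_self_iff.mpr h

theorem ind_append_space (s : List Char) (h : pvAllSp s = true) :
    pvInd (s ++ [' ']) = pvInd s + 1 ∧ pvAllSp (s ++ [' ']) = true := by
  refine ⟨?_, ?_⟩
  · simp only [pvInd]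
    rw [List.takeWhile_append, takeWhile_eq_self_of_allsp s h]
    simp [List.takeWhile]
  · simp only [pvAllSp, List.all_append, List.all_cons, List.all_nil] at *
    simp [h]

theorem ind_append_other (s : List Char) (c : Char) (h : ¬ (pvAllSp s = true ∧ (c == ' ') = true)) :
    pvInd (s ++ [c]) = pvInd s ∧ pvAllSp (s ++ [c]) = false := by
  by_cases hs : pvAllSp s = true
  · have hc : (c == ' ') = false := by
      cases hcc : c == ' ' with
      | true => exact absurd ⟨hs, hcc⟩ h
      | false => rfl
    refine ⟨?_, ?_⟩
    · simp only [pvInd]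
      rw [List.takeWhile_append, takeWhile_eq_self_of_allsp s hs]
      simp [List.takeWhile, hc]
    · simp [pvAllSp, hc]
  · have hs' : pvAllSp s = false := by
      cases hss : pvAllSp s with
      | true => exact absurd hss hs
      | false => rfl
    refine ⟨?_, ?_⟩
    · simp only [pvInd]
      rw [List.takeWhile_append]
      have hne : (s.takeWhile (fun c => c == ' ')).length ≠ s.length := by
        intro he
        refine hs ?_
        simp only [pvAllSp, List.all_eq_true]
        intro a ha
        have hts : s.takeWhile (fun c => c == ' ') = s :=
          (List.takeWhile_prefix (p := fun c => c == ' ')).eq_of_length he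
        exact List.mem_takeWhile_imp (p := fun c => c == ' ') (by rw [hts]; exact ha)
      simp [hne]
    · simp only [pvAllSp, List.all_append] at *
      simp [hs']

-- each emitted line's left clearance is its leading-space count
theorem clearance_left_eq (l : List Char) :
    PySem.Str.len (String.ofList l) - PySem.Str.len (pvLstripSpaces (String.ofList l)) = pvInd l := by
  simp only [PySem.Str.len, pvLstripSpaces, pvInd, String.toList_ofList]
  have h := congrArg List.length (List.takeWhile_append_dropWhile (p := fun c => c == ' ') (l := l))
  rw [List.length_append] at h
  omega

def pvStepA (mw : Int) (st : Int × Int) (line : String) : Int × Int :=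
  (min (PySem.Str.len line - PySem.Str.len (pvLstripSpaces line)) st.1,
   min (mw - PySem.Str.len line) st.2)

-- one emitted line moves A's pair state exactly as B's scan moves (min-left, max-len)
theorem stepA_emit (mw a m : Int) (l : List Char) :
    pvStepA mw (a, mw - m) (String.ofList l) = (min a (pvInd l), mw - max m ((l.length : Nat) : Int)) := by
  have h1 := clearance_left_eq l
  rw [← h1]
  have h2 : PySem.Str.len (String.ofList l) = ((l.length : Nat) : Int) := by
    simp [PySem.Str.len, String.toList_ofList]
  simp only [pvStepA, h2, Prod.mk.injEq]
  constructor <;> omega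

-- reduction equations for splitlines.go / dcScan on a variable head character
theorem go_nil (isB : Char → Bool) (cur : List Char) (acc : List (List Char)) :
    PySem.Chars.splitlines.go isB [] cur acc
      = if cur.isEmpty then acc.reverse else (cur.reverse :: acc).reverse := rfl

theorem go_rn (isB : Char → Bool) (rest cur : List Char) (acc : List (List Char)) :
    PySem.Chars.splitlines.go isB ('\r' :: '\n' :: rest) cur acc
      = PySem.Chars.splitlines.go isB rest [] (cur.reverse :: acc) := rfl

theorem go_break (c : Char) (rest cur : List Char) (acc : List (List Char))
    (hnot : ∀ r', c = '\r' → rest = '\n' :: r' → False) (hb : pvIsB c = true) :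
    PySem.Chars.splitlines.go pvIsB (c :: rest) cur acc
      = PySem.Chars.splitlines.go pvIsB rest [] (cur.reverse :: acc) := by
  rw [PySem.Chars.splitlines.go.eq_def]
  split
  · rename_i h; simp at h
  · rename_i r h
    injection h with hc hr
    exact ((hnot r hc hr).elim)
  · rename_i c2 r2 hx h
    injection h with hc hr
    subst hc; subst hr
    simp [hb]

theorem go_char (c : Char) (rest cur : List Char) (acc : List (List Char))
    (hb : pvIsB c = false) :
    PySem.Chars.splitlines.go pvIsB (c :: rest) cur acc
      = PySem.Chars.splitlines.go pvIsB rest (c :: cur) acc := by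
  rw [PySem.Chars.splitlines.go.eq_def]
  split
  · rename_i h; simp at h
  · rename_i r h
    injection h with hc hr
    rw [hc] at hb
    exact absurd hb (by simp [pvIsB])
  · rename_i c2 r2 hx h
    injection h with hc hr
    subst hc; subst hr
    simp [hb]

theorem dcScan_nil (a m i l : Int) (g : Bool) :
    dcScan [] a m i l g = if l > 0 then (min a i, max m l) else (a, m) := rfl

theorem dcScan_rn (rest : List Char) (a m i l : Int) (g : Bool) :
    dcScan ('\r' :: '\n' :: rest) a m i l g = dcScan rest (min a i) (max m l) 0 0 true := rfl

theorem dcScan_break (c : Char) (rest : List Char) (a m i l : Int) (g : Bool)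
    (hnot : ∀ r', c = '\r' → rest = '\n' :: r' → False) (hb : (c == '\r' || c == '\n') = true) :
    dcScan (c :: rest) a m i l g = dcScan rest (min a i) (max m l) 0 0 true := by
  rw [dcScan.eq_def]
  split
  · rename_i h; simp at h
  · rename_i r h
    injection h with hc hr
    exact ((hnot r hc hr).elim)
  · rename_i c2 r2 hx h
    injection h with hc hr
    subst hc; subst hr
    simp [hb]

theorem dcScan_char (c : Char) (rest : List Char) (a m i l : Int) (g : Bool)
    (hb : (c == '\r' || c == '\n') = false) :
    dcScan (c :: rest) a m i l g =
      if g && (c == ' ') then dcScan rest a m (i + 1) (l + 1) true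
      else dcScan rest a m i (l + 1) false := by
  rw [dcScan.eq_def]
  split
  · rename_i h; simp at h
  · rename_i r h
    injection h with hc hr
    rw [hc] at hb
    simp at hb
  · rename_i c2 r2 hx h
    injection h with hc hr
    subst hc; subst hr
    simp [hb]

-- go accumulates already-emitted lines in acc (reversed)
theorem go_acc (isB : Char → Bool) (cs cur : List Char) (acc0 : List (List Char)) :
    ∀ acc, PySem.Chars.splitlines.go isB cs cur acc
      = acc.reverse ++ PySem.Chars.splitlines.go isB cs cur [] := by
  induction cs, cur, acc0 using PySem.Chars.splitlines.go.induct (isB := isB) with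
  | case1 cur acc h => intro acc'; simp [go_nil, h]
  | case2 cur acc h =>
      intro acc'
      simp only [go_nil]
      rw [if_neg h, if_neg h]
      simp
  | case3 rest cur acc ih =>
      intro acc'
      rw [go_rn, go_rn, ih (cur.reverse :: acc'), ih [cur.reverse]]
      simp
  | case4 c rest cur acc hnot hb ih =>
      intro acc'
      have e : ∀ acc'', PySem.Chars.splitlines.go isB (c :: rest) cur acc''
          = PySem.Chars.splitlines.go isB rest [] (cur.reverse :: acc'') := by
        intro acc''
        rw [PySem.Chars.splitlines.go.eq_def]
        split
        · rename_i h; simp at h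
        · rename_i r h
          injection h with hc hr
          exact ((hnot r hc hr).elim)
        · rename_i c2 r2 hx h
          injection h with hc hr
          subst hc; subst hr
          simp [hb]
      rw [e acc', e [], ih (cur.reverse :: acc'), ih [cur.reverse]]
      simp
  | case5 c rest cur acc hnot hb ih =>
      intro acc'
      have hbf : isB c = false := by
        cases hbb : isB c with
        | true => exact absurd hbb hb
        | false => rfl
      have e : ∀ acc'', PySem.Chars.splitlines.go isB (c :: rest) cur acc''
          = PySem.Chars.splitlines.go isB rest (c :: cur) acc'' := by
        intro acc''
        rw [PySem.Chars.splitlines.go.eq_def]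
        split
        · rename_i h; simp at h
        · rename_i r h
          injection h with hc hr
          exact ((hnot r hc hr).elim)
        · rename_i c2 r2 hx h
          injection h with hc hr
          subst hc; subst hr
          simp [hbf]
      rw [e acc', e [], ih]

-- the heart of the proof: A's fold over the not-yet-split suffix equals B's scan,
-- where cur (reversed) is the partially read current line
theorem main_lemma (mw : Int) (cs cur : List Char) (acc0 : List (List Char)) :
    (∀ c ∈ cs, pvDomChar c = true) → ∀ a m : Int,
    ((PySem.Chars.splitlines.go pvIsB cs cur []).map String.ofList).foldl (pvStepA mw) (a, mw - m)
      = ((dcScan cs a m (pvInd cur.reverse) ((cur.reverse.length : Nat) : Int) (pvAllSp cur.reverse)).1,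
         mw - (dcScan cs a m (pvInd cur.reverse) ((cur.reverse.length : Nat) : Int) (pvAllSp cur.reverse)).2) := by
  induction cs, cur, acc0 using PySem.Chars.splitlines.go.induct (isB := pvIsB) with
  | case1 cur acc h =>
      intro _ a m
      have hcur : cur = [] := by simpa [List.isEmpty_iff] using h
      subst hcur
      simp [go_nil, dcScan_nil, pvInd, pvAllSp]
  | case2 cur acc h =>
      intro _ a m
      have hcur : ¬ cur.isEmpty = true := h
      have hne : cur ≠ [] := by simpa [List.isEmpty_iff] using h
      have hlen : (0 : Int) < ((cur.reverse.length : Nat) : Int) := by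
        have : 0 < cur.reverse.length := by
          simpa [List.length_reverse, List.length_pos_iff] using hne
        exact_mod_cast this
      rw [go_nil, if_neg hcur]
      simp only [List.reverse_cons, List.reverse_nil, List.nil_append, List.map_cons,
        List.map_nil, List.foldl_cons, List.foldl_nil]
      rw [stepA_emit, dcScan_nil, if_pos hlen]
  | case3 rest cur acc ih =>
      intro hc a m
      have hc' : ∀ c ∈ rest, pvDomChar c = true := fun c h => hc c (by simp [h])
      rw [go_rn, go_acc pvIsB rest [] [] [cur.reverse]]
      rw [List.map_append, List.foldl_append]
      simp only [List.map_cons, List.map_nil, List.reverse_cons, List.reverse_nil,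
        List.nil_append, List.foldl_cons, List.foldl_nil]
      rw [stepA_emit, ih hc' (min a (pvInd cur.reverse)) (max m ((cur.reverse.length : Nat) : Int)),
        dcScan_rn]
      simp [pvInd, pvAllSp]
  | case4 c rest cur acc hnot hb ih =>
      intro hc a m
      have hdomc : pvDomChar c = true := hc c (by simp)
      have hc' : ∀ c ∈ rest, pvDomChar c = true := fun c h => hc c (by simp [h])
      have hbr : (c == '\r' || c == '\n') = true := by rw [← isB_of_dom c hdomc]; exact hb
      rw [go_break c rest cur [] hnot hb, go_acc pvIsB rest [] [] [cur.reverse]]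
      rw [List.map_append, List.foldl_append]
      simp only [List.map_cons, List.map_nil, List.reverse_cons, List.reverse_nil,
        List.nil_append, List.foldl_cons, List.foldl_nil]
      rw [stepA_emit, ih hc' (min a (pvInd cur.reverse)) (max m ((cur.reverse.length : Nat) : Int)),
        dcScan_break c rest a m _ _ _ hnot hbr]
      simp [pvInd, pvAllSp]
  | case5 c rest cur acc hnot hb ih =>
      intro hc a m
      have hdomc : pvDomChar c = true := hc c (by simp)
      have hc' : ∀ c ∈ rest, pvDomChar c = true := fun c h => hc c (by simp [h])
      have hbf : pvIsB c = false := by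
        cases hbb : pvIsB c with
        | true => exact absurd hbb hb
        | false => rfl
      have hbr : (c == '\r' || c == '\n') = false := by rw [← isB_of_dom c hdomc]; exact hbf
      rw [go_char c rest cur [] hbf, ih hc' a m,
        dcScan_char c rest a m _ _ _ hbr]
      have hrev : (c :: cur).reverse = cur.reverse ++ [c] := by simp
      by_cases hg : (pvAllSp cur.reverse && (c == ' ')) = true
      · have hand : pvAllSp cur.reverse = true ∧ (c == ' ') = true := by simpa using hg
        obtain ⟨hsp, hcs⟩ := hand
        have hc2 : c = ' ' := by simpa using hcs
        subst hc2
        obtain ⟨e1, e2⟩ := ind_append_space cur.reverse hsp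
        rw [if_pos hg, hrev, e1, e2]
        have : (((cur.reverse ++ [' ']).length : Nat) : Int) = ((cur.reverse.length : Nat) : Int) + 1 := by
          simp
        rw [this]
      · have hg' : (pvAllSp cur.reverse && (c == ' ')) = false := by
          cases hgg : (pvAllSp cur.reverse && (c == ' ')) with
          | true => exact absurd hgg hg
          | false => rfl
        have hnb : ¬ (pvAllSp cur.reverse = true ∧ (c == ' ') = true) := by
          intro ⟨h1, h2⟩
          rw [h1, h2] at hg'
          simp at hg'
        obtain ⟨e1, e2⟩ := ind_append_other cur.reverse c hnb
        rw [if_neg hg, hrev, e1, e2]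
        have : (((cur.reverse ++ [c]).length : Nat) : Int) = ((cur.reverse.length : Nat) : Int) + 1 := by
          simp
        rw [this]

-- ===== VERDICT (by name: the statement is the Claim_ definition above) =====
theorem determine_clearance_spec : Claim_equal_determine_clearance := by
  intro text mw hdom
  unfold Spec_determine_clearance determine_clearance determine_clearance_alt
  have hc : ∀ c ∈ text.toList, pvDomChar c = true := by
    have hs : pvDomStr text = true := by
      have hand : pvDomStr text = true ∧ pvDomInt mw = true := by
        simpa [Dom_determine_clearance] using hdom
      exact hand.1
    simpa [pvDomStr, List.all_eq_true] using hs
  rw [splitlines_eq_go]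
  have h := main_lemma mw text.toList [] [] hc mw 0
  simp only [List.reverse_nil, pvInd, pvAllSp, List.takeWhile_nil, List.length_nil,
    List.all_nil, Nat.cast_zero, sub_zero] at h
  exact h
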